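-- pv_equiv track=rewrite | github.com/chewto/validacion-identidad-api | ocr.py | validateDocumentCountry
-- ===== SOURCE A (Python) =====
-- country = 'HND'
--
-- countries = {
--     'HND': 'HONDURAS',
--     'COL': 'COLOMBIA',
--     'PTY': 'PANAMA'
-- }
--
-- def validateDocumentCountry(ocr):
--     lines = ocr
--
--     for line in lines:
--         for key, value in countries.items():
--             if(value in line):
--                 if(key == country):
--                     return key,value,'OK'
--             if(key in line):
--                 if(key == country):
--                     return key,value,'OK'
--
--     return 'no detectado','no detectado', '!OK'
-- ===== SOURCE B (Python) =====
-- def validateDocumentCountry(ocr):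
--     # Join all OCR lines into one newline-separated blob; since the needles
--     # contain no newline, a match in the blob is exactly a match in some line,
--     # and only the 'HND'/'HONDURAS' entry can ever satisfy key == country.
--     blob = '\n'.join(ocr)
--     if 'HONDURAS' in blob or 'HND' in blob:
--         return 'HND', 'HONDURAS', 'OK'
--     return 'no detectado', 'no detectado', '!OK'
-- ===== Notes on version B (the rewrite author's own statement) =====
-- stated objective: faster
-- what changed: Replaces the per-line loop over a countries dict with a staged computation: join all lines into one newline-separated blob and run two substring tests on the blob (correct because the needles contain no newline, so a blob match is exactly a line match, and only the 'HND' entry can pass key == country).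
import Mathlib
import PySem

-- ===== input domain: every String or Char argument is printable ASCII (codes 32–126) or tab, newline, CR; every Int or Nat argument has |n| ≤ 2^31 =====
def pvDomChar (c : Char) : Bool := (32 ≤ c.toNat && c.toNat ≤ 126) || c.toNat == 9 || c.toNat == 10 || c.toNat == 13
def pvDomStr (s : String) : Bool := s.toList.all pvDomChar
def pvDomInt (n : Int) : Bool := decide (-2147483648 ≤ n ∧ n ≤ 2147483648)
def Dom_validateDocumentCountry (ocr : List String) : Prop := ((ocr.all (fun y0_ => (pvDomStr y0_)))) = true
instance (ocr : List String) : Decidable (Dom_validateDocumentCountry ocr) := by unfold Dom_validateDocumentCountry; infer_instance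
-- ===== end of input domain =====

-- B joins all lines into one newline-separated blob and runs two substring tests on the
-- blob instead of A's per-line loop over a countries dict (objective: faster, measured).

-- ===== PORT A =====
-- module constant `country`
def pvCountry : String := "HND"
-- module dict `countries` (association list in insertion order)
def pvCountries : List (String × String) :=
  [("HND", "HONDURAS"), ("COL", "COLOMBIA"), ("PTY", "PANAMA")]

-- the inner `for key, value in countries.items()` loop over one line:
-- returns `some r` when A's code would `return r` on this line, `none` otherwise
def pvInner (line : String) : List (String × String) → Option (String × String × String)
  | [] => none
  | (key, value) :: rest =>
    if PySem.Str.isIn value line then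
      if key == pvCountry then some (key, value, "OK")
      else if PySem.Str.isIn key line then
        if key == pvCountry then some (key, value, "OK") else pvInner line rest
      else pvInner line rest
    else if PySem.Str.isIn key line then
      if key == pvCountry then some (key, value, "OK") else pvInner line rest
    else pvInner line rest

def validateDocumentCountry (ocr : List String) : String × String × String :=
  match ocr with
  | [] => ("no detectado", "no detectado", "!OK")
  | line :: rest =>
    match pvInner line pvCountries with
    | some r => r
    | none => validateDocumentCountry rest

-- ===== PORT B =====
-- blob = '\n'.join(ocr); then two substring tests on the blob
def validateDocumentCountry_alt (ocr : List String) : String × String × String :=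
  let blob := PySem.Str.join "\n" ocr
  if PySem.Str.isIn "HONDURAS" blob || PySem.Str.isIn "HND" blob then
    ("HND", "HONDURAS", "OK")
  else ("no detectado", "no detectado", "!OK")

-- ===== PRECONDITION & SPEC =====
def Spec_validateDocumentCountry (ocr : List String) (out : String × String × String) : Prop := out = validateDocumentCountry_alt ocr
instance (ocr : List String) (out : String × String × String) : Decidable (Spec_validateDocumentCountry ocr out) := by unfold Spec_validateDocumentCountry; infer_instance

-- ===== CLAIM (what is proved, stated in full; the proofs are below) =====
def Claim_equal_validateDocumentCountry : Prop := ∀ (ocr : List String), Dom_validateDocumentCountry ocr → Spec_validateDocumentCountry ocr (validateDocumentCountry ocr)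

-- ===== LEMMAS AND PROOFS =====

-- a needle not containing c that is a prefix of xs ++ c :: ys is a prefix of xs
theorem prefix_of_prefix_append_cons {needle xs ys : List Char} {c : Char}
    (hc : c ∉ needle) (h : needle <+: xs ++ c :: ys) : needle <+: xs := by
  induction needle generalizing xs with
  | nil => exact List.nil_prefix
  | cons a nd ih =>
    cases xs with
    | nil =>
      rcases h with ⟨t, ht⟩
      simp only [List.nil_append, List.cons_append, List.cons.injEq] at ht
      exact absurd (ht.1 ▸ List.mem_cons_self) hc
    | cons x xs' =>
      rcases h with ⟨t, ht⟩
      simp only [List.cons_append, List.cons.injEq] at ht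
      rcases ht with ⟨rfl, ht2⟩
      rcases ih (fun hm => hc (List.mem_cons_of_mem _ hm)) ⟨t, ht2⟩ with ⟨u, hu⟩
      exact ⟨u, by rw [List.cons_append, hu]⟩

-- a needle not containing c that is an infix of xs ++ c :: ys is an infix of xs or of ys
theorem infix_append_cons_split {needle xs ys : List Char} {c : Char}
    (hc : c ∉ needle) (h : needle <:+: xs ++ c :: ys) :
    needle <:+: xs ∨ needle <:+: ys := by
  induction xs with
  | nil =>
    simp only [List.nil_append] at h
    rcases List.infix_cons_iff.mp h with hp | hi
    · cases needle with
      | nil => exact Or.inl List.nil_infix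
      | cons a nd =>
        rcases hp with ⟨t, ht⟩
        simp only [List.cons_append, List.cons.injEq] at ht
        exact absurd (ht.1 ▸ List.mem_cons_self) hc
    · exact Or.inr hi
  | cons x xs' ih =>
    rcases List.infix_cons_iff.mp h with hp | hi
    · exact Or.inl ((prefix_of_prefix_append_cons hc hp).isInfix)
    · rcases ih hi with h1 | h2
      · exact Or.inl (h1.trans (List.suffix_cons x xs').isInfix)
      · exact Or.inr h2

-- every part is an infix of the joined blob
theorem part_infix_join {l : List Char} {c : Char} {ls : List (List Char)}
    (hl : l ∈ ls) : l <:+: PySem.Chars.join [c] ls := by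
  induction ls with
  | nil => cases hl
  | cons a rest ih =>
    cases rest with
    | nil =>
      rw [PySem.Chars.join_singleton]
      rcases List.mem_cons.mp hl with rfl | h
      · exact List.infix_refl _
      · cases h
    | cons b t =>
      rw [PySem.Chars.join_cons_cons]
      rcases List.mem_cons.mp hl with rfl | h
      · exact ((List.prefix_append l [c]).isInfix).trans
          ((List.prefix_append (l ++ [c]) _).isInfix)
      · exact (ih h).trans (List.suffix_append (a ++ [c]) _).isInfix

-- for a nonempty needle without c: infix of the c-joined blob ↔ infix of some part
theorem infix_join_iff (needle : List Char) (c : Char) (ls : List (List Char))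
    (hc : c ∉ needle) (hne : needle ≠ []) :
    needle <:+: PySem.Chars.join [c] ls ↔ ∃ l ∈ ls, needle <:+: l := by
  constructor
  · intro h
    induction ls with
    | nil =>
      rw [show PySem.Chars.join [c] [] = [] from rfl] at h
      exact absurd (List.infix_nil.mp h) hne
    | cons a rest ih =>
      cases rest with
      | nil =>
        rw [PySem.Chars.join_singleton] at h
        exact ⟨a, List.mem_cons_self, h⟩
      | cons b t =>
        rw [PySem.Chars.join_cons_cons, List.append_assoc, List.singleton_append] at h
        rcases infix_append_cons_split hc h with h1 | h2
        · exact ⟨a, List.mem_cons_self, h1⟩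
        · rcases ih h2 with ⟨l, hl, hinf⟩
          exact ⟨l, List.mem_cons_of_mem _ hl, hinf⟩
  · rintro ⟨l, hl, hinf⟩
    exact hinf.trans (part_infix_join hl)

-- B's blob test, per needle, equals the per-line any
theorem isIn_join_eq_any (sub : String) (ocr : List String)
    (hc : '\n' ∉ sub.toList) (hne : sub.toList ≠ []) :
    PySem.Str.isIn sub (PySem.Str.join "\n" ocr) = ocr.any (fun l => PySem.Str.isIn sub l) := by
  rw [Bool.eq_iff_iff, PySem.Str.isIn_iff_infix, PySem.Str.toList_join]
  rw [show ("\n" : String).toList = ['\n'] from rfl]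
  rw [infix_join_iff sub.toList '\n' (ocr.map String.toList) hc hne, List.any_eq_true]
  constructor
  · rintro ⟨l, hl, hinf⟩
    rcases List.mem_map.mp hl with ⟨s, hs, rfl⟩
    exact ⟨s, hs, (PySem.Str.isIn_iff_infix _ _).mpr hinf⟩
  · rintro ⟨s, hs, h⟩
    exact ⟨s.toList, List.mem_map_of_mem hs, (PySem.Str.isIn_iff_infix _ _).mp h⟩

-- A's inner dict loop reduces to the two 'HND' tests on one line
theorem pvInner_eq (line : String) :
    pvInner line pvCountries =
      (if PySem.Str.isIn "HONDURAS" line || PySem.Str.isIn "HND" line then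
        some ("HND", "HONDURAS", "OK") else none) := by
  have e1 : (("HND" : String) == pvCountry) = true := by decide
  have e2 : (("COL" : String) == pvCountry) = false := by decide
  have e3 : (("PTY" : String) == pvCountry) = false := by decide
  by_cases h1 : PySem.Str.isIn "HONDURAS" line <;>
  by_cases h2 : PySem.Str.isIn "HND" line <;>
  by_cases h3 : PySem.Str.isIn "COLOMBIA" line <;>
  by_cases h4 : PySem.Str.isIn "COL" line <;>
  by_cases h5 : PySem.Str.isIn "PANAMA" line <;>
  by_cases h6 : PySem.Str.isIn "PTY" line <;>
    simp only [pvCountries, pvInner, e1, e2, e3, h1, h2, h3, h4, h5, h6,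
      Bool.or_self, if_true, Bool.or_true, Bool.true_or] <;> rfl

-- A equals the staged form: first-match recursion = any-over-lines
theorem a_eq_any (ocr : List String) :
    validateDocumentCountry ocr =
      (if ocr.any (fun l => PySem.Str.isIn "HONDURAS" l || PySem.Str.isIn "HND" l) then
        ("HND", "HONDURAS", "OK") else ("no detectado", "no detectado", "!OK")) := by
  induction ocr with
  | nil => rfl
  | cons line rest ih =>
    rw [validateDocumentCountry, pvInner_eq, List.any_cons]
    cases h : (PySem.Str.isIn "HONDURAS" line || PySem.Str.isIn "HND" line) with
    | true => rfl
    | false => exact ih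

-- any distributes over the disjunction of the two line tests
theorem any_or_split (ocr : List String) :
    ocr.any (fun l => PySem.Str.isIn "HONDURAS" l || PySem.Str.isIn "HND" l) =
      (ocr.any (fun l => PySem.Str.isIn "HONDURAS" l) ||
       ocr.any (fun l => PySem.Str.isIn "HND" l)) := by
  induction ocr with
  | nil => rfl
  | cons a t ih =>
    rw [List.any_cons, List.any_cons, List.any_cons, ih]
    cases PySem.Str.isIn "HONDURAS" a <;> cases PySem.Str.isIn "HND" a <;>
      cases t.any (fun l => PySem.Str.isIn "HONDURAS" l) <;>
      cases t.any (fun l => PySem.Str.isIn "HND" l) <;> rfl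

theorem eq_all (ocr : List String) :
    validateDocumentCountry ocr = validateDocumentCountry_alt ocr := by
  rw [a_eq_any]
  show _ = (if PySem.Str.isIn "HONDURAS" (PySem.Str.join "\n" ocr) ||
               PySem.Str.isIn "HND" (PySem.Str.join "\n" ocr) then
        ("HND", "HONDURAS", "OK") else ("no detectado", "no detectado", "!OK"))
  rw [isIn_join_eq_any "HONDURAS" ocr (by decide) (by decide),
      isIn_join_eq_any "HND" ocr (by decide) (by decide), ← any_or_split]

-- ===== VERDICT (by name: the statement is the Claim_ definition above) =====
theorem validateDocumentCountry_spec : Claim_equal_validateDocumentCountry :=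
  fun ocr _ => eq_all ocr
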